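-- pv_equiv track=rewrite | github.com/openpaul/dnaconverter | dnaEncode.py | bytearrayconversion
-- ===== SOURCE A (Python) =====
-- def bytearrayconversion(bytearray,hugetryte):
-- 	#loop over the array of bytes
-- 	for item in bytearray:
-- 	#each byte as its integer now needs to be calculatet as ternary number
-- 	# so we divide trough 3 and as our new format will have the base of 3 we will have to make 6 iterations so we can encode numbers until 255
-- 		dnaint = item    # copy the integer
-- 		rest   = dnaint  # the rest by start is the numer
-- 		i      = 6       # the number of iterations
-- 		ternary = list() # ternary is the list we save our "trytes" in
--
-- 		while i > 0:
-- 			rest   = dnaint%3    # the rest is interesting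
-- 			dnaint = dnaint//3   # the integer to pass on
-- 			i      = i - 1       # next iteration
-- 			hugetryte.append(rest) # the rest gets saved
-- 	return hugetryte
-- ===== SOURCE B (Python) =====
-- def bytearrayconversion(bytearray, hugetryte):
--     # memoized table: value -> its 6 ternary digits (least significant first)
--     cache = {}
--     for item in bytearray:
--         if item not in cache:
--             n = item
--             digs = []
--             for _ in range(6):
--                 n, r = divmod(n, 3)
--                 digs.append(r)
--             cache[item] = digs
--         hugetryte.extend(cache[item])
--     return hugetryte
-- ===== Notes on version B (the rewrite author's own statement) =====
-- stated objective: alternative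
-- what changed: Replaces A's per-byte 6-step while-loop writing straight into hugetryte with an on-demand memoization dict mapping each value to its 6 ternary digits (computed once by divmod), then extended onto the output.
import Mathlib
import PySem

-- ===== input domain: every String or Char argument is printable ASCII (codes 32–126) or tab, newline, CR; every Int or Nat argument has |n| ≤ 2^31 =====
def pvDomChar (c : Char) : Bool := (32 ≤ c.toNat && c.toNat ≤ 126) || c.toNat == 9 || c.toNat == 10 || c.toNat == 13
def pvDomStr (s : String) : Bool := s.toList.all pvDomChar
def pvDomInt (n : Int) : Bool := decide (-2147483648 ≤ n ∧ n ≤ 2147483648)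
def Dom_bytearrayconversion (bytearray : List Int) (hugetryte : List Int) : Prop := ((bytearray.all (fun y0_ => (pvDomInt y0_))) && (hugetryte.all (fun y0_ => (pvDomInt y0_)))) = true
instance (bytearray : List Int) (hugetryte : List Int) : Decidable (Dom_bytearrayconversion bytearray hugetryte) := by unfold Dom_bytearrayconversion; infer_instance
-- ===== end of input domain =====

-- B replaces A's per-byte 6-step while-loop with an on-demand memo table (value -> its 6 ternary
-- digits, least significant first) that is extended onto the output; return-value equivalence only
-- (both Pythons also mutate hugetryte in place the same way).

-- ===== PORT A =====
-- the inner 'while i > 0' loop of A: appends item%3 to hugetryte, i times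
def pvInnerA : Int → Nat → List Int → List Int
  | _, 0, ht => ht
  | dnaint, Nat.succ i, ht =>
      pvInnerA (PySem.Int.floordiv dnaint 3) i (ht ++ [PySem.Int.mod dnaint 3])

def bytearrayconversion (bytearray : List Int) (hugetryte : List Int) : List Int :=
  bytearray.foldl (fun ht item => pvInnerA item 6 ht) hugetryte

-- ===== PORT B =====
-- Source B's inner 'for _ in range(6)' loop building the digit list by divmod
def pvDigitsLoop : Int → Nat → List Int → List Int
  | _, 0, digs => digs
  | n, Nat.succ k, digs =>
      pvDigitsLoop (PySem.Int.floordiv n 3) k (digs ++ [PySem.Int.mod n 3])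

def bytearrayconversion_alt (bytearray : List Int) (hugetryte : List Int) : List Int :=
  (bytearray.foldl
    (fun (st : PySem.Dict Int (List Int) × List Int) item =>
      let cache := if st.1.contains item then st.1
                   else st.1.insert item (pvDigitsLoop item 6 [])
      (cache, st.2 ++ cache.getD item []))
    ((PySem.Dict.empty : PySem.Dict Int (List Int)), hugetryte)).2

-- ===== PRECONDITION & SPEC =====
def Spec_bytearrayconversion (bytearray : List Int) (hugetryte : List Int) (out : List Int) : Prop := out = bytearrayconversion_alt bytearray hugetryte
instance (bytearray : List Int) (hugetryte : List Int) (out : List Int) : Decidable (Spec_bytearrayconversion bytearray hugetryte out) := by unfold Spec_bytearrayconversion; infer_instance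

-- ===== CLAIM (what is proved, stated in full; the proofs are below) =====
def Claim_equal_bytearrayconversion : Prop := ∀ (bytearray : List Int) (hugetryte : List Int), Dom_bytearrayconversion bytearray hugetryte → Spec_bytearrayconversion bytearray hugetryte (bytearrayconversion bytearray hugetryte)

-- ===== LEMMAS AND PROOFS =====

theorem pvDigitsLoop_prefix (k : Nat) : ∀ (n : Int) (d : List Int),
    pvDigitsLoop n k d = d ++ pvDigitsLoop n k [] := by
  induction k with
  | zero => intro n d; simp [pvDigitsLoop]
  | succ k ih =>
      intro n d
      rw [pvDigitsLoop, pvDigitsLoop]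
      rw [ih (PySem.Int.floordiv n 3) (d ++ [PySem.Int.mod n 3]),
          ih (PySem.Int.floordiv n 3) ([] ++ [PySem.Int.mod n 3])]
      simp

theorem pvInnerA_eq (k : Nat) : ∀ (n : Int) (ht : List Int),
    pvInnerA n k ht = ht ++ pvDigitsLoop n k [] := by
  induction k with
  | zero => intro n ht; simp [pvInnerA, pvDigitsLoop]
  | succ k ih =>
      intro n ht
      rw [pvInnerA, ih, pvDigitsLoop,
          pvDigitsLoop_prefix k (PySem.Int.floordiv n 3) ([] ++ [PySem.Int.mod n 3])]
      simp

-- invariant: every cached value is the 6-digit list of its key, so B's fold produces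
-- exactly "append digits of each item" regardless of the cache's contents
theorem pvFoldB_eq (bs : List Int) : ∀ (cache : PySem.Dict Int (List Int)) (ht : List Int),
    (∀ k v, cache.get? k = some v → v = pvDigitsLoop k 6 []) →
    (bs.foldl
      (fun (st : PySem.Dict Int (List Int) × List Int) item =>
        let cache := if st.1.contains item then st.1
                     else st.1.insert item (pvDigitsLoop item 6 [])
        (cache, st.2 ++ cache.getD item []))
      (cache, ht)).2
      = bs.foldl (fun ht item => ht ++ pvDigitsLoop item 6 []) ht := by
  induction bs with
  | nil => intro cache ht _; rfl
  | cons x xs ih =>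
      intro cache ht hinv
      by_cases hc : cache.contains x
      · simp only [List.foldl_cons, if_pos hc]
        have hsome : (cache.get? x).isSome := by
          rw [← PySem.Dict.contains_eq_isSome_get?, hc]
        obtain ⟨v, hv⟩ := Option.isSome_iff_exists.mp hsome
        have hval : cache.getD x [] = pvDigitsLoop x 6 [] := by
          rw [PySem.Dict.getD_eq_get?_getD, hv, Option.getD_some, hinv x v hv]
        rw [hval]
        exact ih cache _ hinv
      · simp only [List.foldl_cons, if_neg hc]
        have hval : (cache.insert x (pvDigitsLoop x 6 [])).getD x [] = pvDigitsLoop x 6 [] :=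
          PySem.Dict.getD_insert_self _ _ _ _
        rw [hval]
        refine ih _ _ ?_
        intro k v hk
        by_cases hkx : k = x
        · subst hkx
          rw [PySem.Dict.get?_insert_self] at hk
          exact (Option.some_inj.mp hk).symm
        · rw [PySem.Dict.get?_insert_of_ne _ _ hkx] at hk
          exact hinv k v hk

-- ===== VERDICT (by name: the statement is the Claim_ definition above) =====
theorem bytearrayconversion_spec : Claim_equal_bytearrayconversion := by
  intro bs ht hd
  clear hd
  unfold Spec_bytearrayconversion bytearrayconversion bytearrayconversion_alt
  rw [pvFoldB_eq bs PySem.Dict.empty ht (by intro k v h; simp [PySem.Dict.get?_empty] at h)]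
  induction bs generalizing ht with
  | nil => rfl
  | cons x xs ih => rw [List.foldl_cons, List.foldl_cons, pvInnerA_eq]; exact ih _
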